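-- pv_equiv track=rewrite | github.com/kk49/deca | python/deca/deca/db_processor.py | src_indexes_process
-- ===== SOURCE A (Python) =====
-- def src_indexes_process(src_indexes, process_all=False):
--     indexes = []
--     nodes = {}
--     done_set = set()
--
--     for uid, v_hash, processed in src_indexes:
--         if v_hash is None or process_all:
--             # handle physical only files with no vpath (EXE, ARC, TAB, EXTERNALS)
--             #   or if processing each node individually
--             if processed:
--                 done_set.add(uid)
--             else:
--                 indexes.append(uid)
--         else:
--             # normal case of files that have v_hashes and v_paths (possibly)
--             info = nodes.get(v_hash, None)
--             if info is None:
--                 nodes[v_hash] = (uid, processed)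
--             elif processed and not info[1]:
--                 nodes[v_hash] = (uid, processed)
--
--     for k, v in nodes.items():
--         uid, processed = v
--         if processed:
--             done_set.add(k)
--         else:
--             indexes.append(uid)
--
--     return indexes, done_set
-- ===== SOURCE B (Python) =====
-- def src_indexes_process(src_indexes, process_all=False):
--     # staged passes: split direct/hashed, comprehensions for the direct part,
--     # then a first-uid dict plus a processed-hash set reduce the hashed part
--     if process_all:
--         direct = list(src_indexes)
--         hashed = []
--     else:
--         direct = [e for e in src_indexes if e[1] is None]
--         hashed = [e for e in src_indexes if e[1] is not None]
--
--     indexes = [u for u, _h, p in direct if not p]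
--     done_set = set(u for u, _h, p in direct if p)
--
--     processed_hashes = set(h for _u, h, p in hashed if p)
--     first_uid = {}
--     for u, h, _p in hashed:
--         first_uid.setdefault(h, u)
--
--     for h, u in first_uid.items():
--         if h in processed_hashes:
--             done_set.add(h)
--         else:
--             indexes.append(u)
--     return indexes, done_set
-- ===== Notes on version B (the rewrite author's own statement) =====
-- stated objective: alternative
-- what changed: B replaces A's interleaved single pass with its keep-or-upgrade nodes table by staged passes: split entries into direct/hashed lists, emit the direct part with comprehensions, then reduce the hashed part with a first-uid-per-hash dict plus a set of hashes that have a processed entry.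
import Mathlib
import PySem

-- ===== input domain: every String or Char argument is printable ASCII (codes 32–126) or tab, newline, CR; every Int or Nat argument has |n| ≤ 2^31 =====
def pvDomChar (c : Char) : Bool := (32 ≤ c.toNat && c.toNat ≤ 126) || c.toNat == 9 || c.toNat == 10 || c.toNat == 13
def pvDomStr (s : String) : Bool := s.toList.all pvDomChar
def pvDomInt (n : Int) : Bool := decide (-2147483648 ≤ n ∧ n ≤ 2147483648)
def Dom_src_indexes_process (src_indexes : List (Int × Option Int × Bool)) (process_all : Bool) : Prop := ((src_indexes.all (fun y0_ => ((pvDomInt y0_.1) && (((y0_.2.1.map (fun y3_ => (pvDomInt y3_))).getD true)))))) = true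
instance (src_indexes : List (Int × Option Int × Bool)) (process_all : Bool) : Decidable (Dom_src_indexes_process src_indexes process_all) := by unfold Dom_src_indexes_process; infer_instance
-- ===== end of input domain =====

-- B replaces A's interleaved single pass (keep-or-upgrade nodes table consulted per entry) by
-- staged passes: split direct/hashed, comprehensions for the direct part, then a first-uid dict
-- plus a processed-hash membership set reduce the hashed part — alternative decomposition, not faster.

-- ===== PORT A =====
-- one iteration of A's first loop: state is (indexes, nodes, done_set)
def pvAStep (process_all : Bool)
    (st : List Int × PySem.Dict Int (Int × Bool) × PySem.Set Int)
    (e : Int × Option Int × Bool) :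
    List Int × PySem.Dict Int (Int × Bool) × PySem.Set Int :=
  match st, e with
  | (indexes, nodes, done), (uid, vhash, processed) =>
    match vhash with
    | none =>
      if processed then (indexes, nodes, PySem.Set.add done uid)
      else (indexes ++ [uid], nodes, done)
    | some h =>
      if process_all then
        if processed then (indexes, nodes, PySem.Set.add done uid)
        else (indexes ++ [uid], nodes, done)
      else
        match nodes.get? h with
        | none => (indexes, nodes.insert h (uid, processed), done)
        | some info =>
          if processed && !info.2 then (indexes, nodes.insert h (uid, processed), done)
          else (indexes, nodes, done)

-- one iteration of A's second loop over nodes.items()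
def pvAFinStep (st : List Int × PySem.Set Int) (kv : Int × Int × Bool) :
    List Int × PySem.Set Int :=
  if kv.2.2 then (st.1, PySem.Set.add st.2 kv.1)
  else (st.1 ++ [kv.2.1], st.2)

def src_indexes_process (src_indexes : List (Int × Option Int × Bool)) (process_all : Bool) :
    List Int × List Int :=
  let r := src_indexes.foldl (pvAStep process_all) ([], PySem.Dict.empty, PySem.Set.empty)
  r.2.1.items.foldl pvAFinStep (r.1, r.2.2)

-- ===== PORT B =====
-- first_uid dict: for u, h, _p in hashed: first_uid.setdefault(h, u)
def pvFirstUids (hashed : List (Int × Option Int × Bool)) : PySem.Dict Int Int :=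
  hashed.foldl (fun d e =>
    match e.2.1 with
    | some h => d.setdefault h e.1
    | none => d) PySem.Dict.empty

-- body of B's final loop over first_uid.items()
def pvReduceGroup (ph : PySem.Set Int) (st : List Int × PySem.Set Int) (kv : Int × Int) :
    List Int × PySem.Set Int :=
  if PySem.Set.contains ph kv.1 then (st.1, PySem.Set.add st.2 kv.1)
  else (st.1 ++ [kv.2], st.2)

def src_indexes_process_alt (src_indexes : List (Int × Option Int × Bool)) (process_all : Bool) :
    List Int × List Int :=
  let direct := if process_all then src_indexes
                else src_indexes.filter (fun e => e.2.1.isNone)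
  let hashed := if process_all then []
                else src_indexes.filter (fun e => e.2.1.isSome)
  let indexes := (direct.filter (fun e => !e.2.2)).map (fun e => e.1)
  let done_set : PySem.Set Int :=
    PySem.Set.ofList ((direct.filter (fun e => e.2.2)).map (fun e => e.1))
  let processed_hashes : PySem.Set Int :=
    PySem.Set.ofList ((hashed.filter (fun e => e.2.2)).filterMap (fun e => e.2.1))
  (pvFirstUids hashed).items.foldl (pvReduceGroup processed_hashes) (indexes, done_set)

-- ===== PRECONDITION & SPEC =====
def Spec_src_indexes_process (src_indexes : List (Int × Option Int × Bool)) (process_all : Bool) (out : List Int × List Int) : Prop := out = src_indexes_process_alt src_indexes process_all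
instance (src_indexes : List (Int × Option Int × Bool)) (process_all : Bool) (out : List Int × List Int) : Decidable (Spec_src_indexes_process src_indexes process_all out) := by unfold Spec_src_indexes_process; infer_instance

-- ===== CLAIM (what is proved, stated in full; the proofs are below) =====
def Claim_equal_src_indexes_process : Prop := ∀ (src_indexes : List (Int × Option Int × Bool)) (process_all : Bool), Dom_src_indexes_process src_indexes process_all → Spec_src_indexes_process src_indexes process_all (src_indexes_process src_indexes process_all)

-- ===== LEMMAS AND PROOFS =====

-- the group of a hash: the (uid, processed) pairs of the entries carrying that hash, in order
def pvGrp (hs : List (Int × Option Int × Bool)) (h : Int) : List (Int × Bool) :=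
  hs.filterMap (fun e => if e.2.1 = some h then some (e.1, e.2.2) else none)

-- A's reduced value for a group: first processed entry if any, else the first entry
def pvPick (l : List (Int × Bool)) : Int × Bool :=
  match l.find? (fun e => e.2) with
  | some e => e
  | none => ((l.headD (0, false)).1, false)

-- the nodes-table update A performs for one entry (the hashed, not-process_all branch)
def pvNStep (n : PySem.Dict Int (Int × Bool)) (e : Int × Option Int × Bool) :
    PySem.Dict Int (Int × Bool) :=
  match e.2.1 with
  | none => n
  | some h =>
    match n.get? h with
    | none => n.insert h (e.1, e.2.2)
    | some info => if e.2.2 && !info.2 then n.insert h (e.1, e.2.2) else n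

lemma pvFind?_isSome_eq_any (l : List (Int × Bool)) (p : Int × Bool → Bool) :
    (l.find? p).isSome = l.any p := by
  induction l with
  | nil => rfl
  | cons x xs ih => by_cases h : p x <;> simp [List.find?, h, ih]

lemma pvPick_snd_eq_any (l : List (Int × Bool)) :
    (pvPick l).2 = l.any (fun e => e.2) := by
  have hs := pvFind?_isSome_eq_any l (fun e => e.2)
  unfold pvPick
  cases hf : l.find? (fun e => e.2) with
  | none => rw [hf] at hs; simpa using hs
  | some e =>
    rw [hf] at hs
    have h2 : e.2 = true := List.find?_some hf
    rw [h2]; simpa using hs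

lemma pvPick_singleton (e : Int × Bool) : pvPick [e] = e := by
  obtain ⟨a, b⟩ := e
  cases b <;> simp [pvPick, List.find?]

lemma pvPick_append (l : List (Int × Bool)) (e : Int × Bool) (hl : l ≠ []) :
    pvPick (l ++ [e]) = if e.2 && !(pvPick l).2 then e else pvPick l := by
  unfold pvPick
  rw [List.find?_append]
  cases hf : l.find? (fun x => x.2) with
  | some x =>
    have hx : x.2 = true := List.find?_some hf
    simp [hx]
  | none =>
    obtain ⟨a, b⟩ := e
    cases b with
    | true => simp [List.find?]
    | false =>
      cases l with
      | nil => exact absurd rfl hl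
      | cons q t => simp [List.find?]

-- A's first loop decomposes into the direct effects and a nodes fold over the hashed entries
lemma pvDecompA_false :
    ∀ (src : List (Int × Option Int × Bool)) (i : List Int)
      (n : PySem.Dict Int (Int × Bool)) (d : PySem.Set Int),
    src.foldl (pvAStep false) (i, n, d) =
      (i ++ ((src.filter (fun e => e.2.1.isNone)).filter (fun e => !e.2.2)).map (fun e => e.1),
       (src.filter (fun e => e.2.1.isSome)).foldl pvNStep n,
       (((src.filter (fun e => e.2.1.isNone)).filter (fun e => e.2.2)).map (fun e => e.1)).foldl
         PySem.Set.add d) := by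
  intro src
  induction src with
  | nil => intro i n d; simp
  | cons e rest ih =>
    intro i n d
    obtain ⟨u, vh, p⟩ := e
    cases vh with
    | none => cases p <;> simp [pvAStep, ih]
    | some h =>
      have hstep : pvAStep false (i, n, d) (u, some h, p) = (i, pvNStep n (u, some h, p), d) := by
        unfold pvAStep pvNStep
        cases hg : n.get? h with
        | none => simp [hg]
        | some info => by_cases hc : (p && !info.2) = true <;> simp [hg, hc]
      simp only [List.foldl_cons, hstep]
      simp [ih, pvNStep]

lemma pvDecompA_true :
    ∀ (src : List (Int × Option Int × Bool)) (i : List Int)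
      (n : PySem.Dict Int (Int × Bool)) (d : PySem.Set Int),
    src.foldl (pvAStep true) (i, n, d) =
      (i ++ (src.filter (fun e => !e.2.2)).map (fun e => e.1), n,
       ((src.filter (fun e => e.2.2)).map (fun e => e.1)).foldl PySem.Set.add d) := by
  intro src
  induction src with
  | nil => intro i n d; simp
  | cons e rest ih =>
    intro i n d
    obtain ⟨u, vh, p⟩ := e
    cases vh <;> cases p <;> simp [pvAStep, ih]

lemma pvGrp_append (hs : List (Int × Option Int × Bool)) (e : Int × Option Int × Bool) (k : Int) :
    pvGrp (hs ++ [e]) k = pvGrp hs k ++ (if e.2.1 = some k then [(e.1, e.2.2)] else []) := by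
  unfold pvGrp
  rw [List.filterMap_append]
  by_cases hk : e.2.1 = some k <;> simp [hk]

-- the crux: A's nodes fold is the pvPick image of B's first_uid dict, whose values are
-- the groups' first uids and whose keys name exactly the nonempty groups
lemma pvCrux (hs : List (Int × Option Int × Bool)) :
    ((hs.foldl pvNStep PySem.Dict.empty).items
       = (pvFirstUids hs).items.map (fun kv => (kv.1, pvPick (pvGrp hs kv.1)))) ∧
    (pvFirstUids hs).keys.Nodup ∧
    (∀ k, (pvFirstUids hs).contains k = !(pvGrp hs k).isEmpty) ∧
    (∀ kv ∈ (pvFirstUids hs).items, kv.2 = ((pvGrp hs kv.1).headD (0, false)).1) := by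
  induction hs using List.reverseRecOn with
  | nil =>
    refine ⟨rfl, by simp [pvFirstUids, PySem.Dict.empty], ?_, ?_⟩
    · intro k; simp [pvFirstUids, pvGrp, PySem.Dict.empty]
    · intro kv hkv; simp [pvFirstUids, PySem.Dict.empty] at hkv
  | append_singleton hs e ih =>
    obtain ⟨h1, h2, h3, h4⟩ := ih
    have hn : (hs ++ [e]).foldl pvNStep PySem.Dict.empty
        = pvNStep (hs.foldl pvNStep PySem.Dict.empty) e := by
      rw [List.foldl_append]; rfl
    set n := hs.foldl pvNStep PySem.Dict.empty with hndef
    set fu := pvFirstUids hs with hfudef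
    obtain ⟨u, vh, p⟩ := e
    cases vh with
    | none =>
      have hfu : pvFirstUids (hs ++ [(u, none, p)]) = fu := by
        rw [hfudef]; unfold pvFirstUids; rw [List.foldl_append]; rfl
      simp only [hfu, hn]
      refine ⟨?_, h2, ?_, ?_⟩
      · unfold pvNStep; simp only []
        rw [h1]
        apply List.map_congr_left
        intro kv _; rw [pvGrp_append]; simp [pvGrp]
      · intro k; rw [pvGrp_append]; simp [h3 k]
      · intro kv hkv; rw [pvGrp_append]; simp [h4 kv hkv]
    | some h =>
      -- key facts shared by both cases
      have hfu : pvFirstUids (hs ++ [(u, some h, p)]) = fu.setdefault h u := by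
        rw [hfudef]; unfold pvFirstUids; rw [List.foldl_append]; rfl
      have hkeys : n.keys = fu.keys := by
        show n.items.map (·.1) = fu.items.map (·.1)
        rw [h1, List.map_map]; rfl
      have hnnd : n.keys.Nodup := by rw [hkeys]; exact h2
      by_cases hc : fu.contains h = true
      · -- hash already seen: first_uid unchanged; nodes may upgrade to the first processed uid
        have hg : ¬ (pvGrp hs h).isEmpty := by
          have := h3 h; rw [hc] at this; simpa using this.symm
        have hgne : pvGrp hs h ≠ [] := by
          cases hgg : pvGrp hs h with
          | nil => rw [hgg] at hg; simp at hg
          | cons a t => simp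
        obtain ⟨v, hv⟩ : ∃ v, fu.get? h = some v := by
          have h0 := PySem.Dict.contains_eq_isSome_get? fu h
          rw [hc] at h0
          exact Option.isSome_iff_exists.mp h0.symm
        have hmemfu : (h, v) ∈ fu.items := PySem.Dict.mem_items_of_get?_eq_some fu hv
        have hmemn : (h, pvPick (pvGrp hs h)) ∈ n.items := by
          rw [h1]; exact List.mem_map.mpr ⟨(h, v), hmemfu, rfl⟩
        have hgetn : n.get? h = some (pvPick (pvGrp hs h)) :=
          PySem.Dict.get?_of_mem_items n hmemn hnnd
        have hcn : n.contains h = true := by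
          rw [PySem.Dict.contains_eq_isSome_get? n h, hgetn]; rfl
        have hpa : pvPick (pvGrp hs h ++ [(u, p)])
            = if p && !(pvPick (pvGrp hs h)).2 then (u, p) else pvPick (pvGrp hs h) := by
          simpa using pvPick_append (pvGrp hs h) (u, p) hgne
        simp only [hfu, hn, PySem.Dict.setdefault_of_contains fu u hc]
        refine ⟨?_, h2, ?_, ?_⟩
        · unfold pvNStep; simp only [hgetn]
          by_cases hcond : (p && !(pvPick (pvGrp hs h)).2) = true
          · rw [if_pos hcond]
            rw [PySem.Dict.items_insert_of_contains n _ hcn, h1, List.map_map]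
            apply List.map_congr_left
            intro kv hkv
            rw [pvGrp_append]
            by_cases hkh : kv.1 = h
            · simp [Function.comp, hkh, hpa, hcond]
            · simp [Function.comp, hkh, Ne.symm hkh]
          · rw [if_neg hcond]
            rw [h1]
            apply List.map_congr_left
            intro kv hkv
            rw [pvGrp_append]
            by_cases hkh : kv.1 = h
            · simp [hkh, hpa, hcond]
            · simp [Ne.symm hkh]
        · intro k; rw [pvGrp_append]
          by_cases hkh : k = h
          · rw [hkh, hc]
            cases hgg : pvGrp hs h with
            | nil => exact absurd hgg hgne
            | cons a t => simp
          · simp [Ne.symm hkh, h3 k]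
        · intro kv hkv
          rw [pvGrp_append]
          by_cases hkh : kv.1 = h
          · have hh : kv.2 = ((pvGrp hs kv.1).headD (0, false)).1 := h4 kv hkv
            rw [hh, hkh]
            simp only []
            cases hgg : pvGrp hs h with
            | nil => exact absurd hgg hgne
            | cons a t => simp
          · simp [Ne.symm hkh, h4 kv hkv]
      · -- fresh hash: both dicts append at the end
        have hcB : fu.contains h = false := by simpa using hc
        have hge : pvGrp hs h = [] := by
          have := h3 h; rw [hcB] at this
          cases hgg : pvGrp hs h with
          | nil => rfl
          | cons a t => rw [hgg] at this; simp at this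
        have hcA : n.contains h = false := by
          have h1' := PySem.Dict.contains_iff_mem_keys n h
          have h2' := PySem.Dict.contains_iff_mem_keys fu h
          rw [hkeys] at h1'
          cases hA : n.contains h
          · rfl
          · exact absurd (h2'.mpr (h1'.mp hA)) (by simp [hcB])
        have hgetn : n.get? h = none := by
          have h0 := PySem.Dict.contains_eq_isSome_get? n h
          rw [hcA] at h0
          exact Option.not_isSome_iff_eq_none.mp (by simp [← h0])
        simp only [hfu, hn, PySem.Dict.setdefault_of_not_contains fu u hcB]
        refine ⟨?_, ?_, ?_, ?_⟩
        · unfold pvNStep; simp only [hgetn]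
          rw [PySem.Dict.items_insert_of_not_contains n _ hcA,
              PySem.Dict.items_insert_of_not_contains fu _ hcB, List.map_append, h1]
          congr 1
          · apply List.map_congr_left
            intro kv hkv
            rw [pvGrp_append]
            have hkh : kv.1 ≠ h := by
              intro hkh
              have : fu.contains kv.1 = true := by
                rw [PySem.Dict.contains_iff_mem_keys]
                exact PySem.Dict.mem_keys_of_mem_items fu hkv
              rw [hkh, hcB] at this; exact absurd this (by simp)
            simp [Ne.symm hkh]
          · simp only [List.map_cons, List.map_nil]
            rw [pvGrp_append]
            simp [hge, pvPick_singleton]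
        · exact PySem.Dict.nodup_keys_insert fu h u h2
        · intro k; rw [pvGrp_append]
          rw [PySem.Dict.contains_insert]
          by_cases hkh : k = h
          · subst hkh; simp [hge]
          · simp [hkh, Ne.symm hkh, h3 k]
        · intro kv hkv
          rw [PySem.Dict.items_insert_of_not_contains fu _ hcB] at hkv
          rcases List.mem_append.mp hkv with hkv | hkv
          · rw [pvGrp_append]
            have hkh : kv.1 ≠ h := by
              intro hkh
              have : fu.contains kv.1 = true := by
                rw [PySem.Dict.contains_iff_mem_keys]
                exact PySem.Dict.mem_keys_of_mem_items fu hkv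
              rw [hkh, hcB] at this; exact absurd this (by simp)
            simp [Ne.symm hkh, h4 kv hkv]
          · simp at hkv; subst hkv
            rw [pvGrp_append]; simp [hge]

-- membership in B's processed-hash set is "the group has a processed entry"
lemma pvPh_contains (hs : List (Int × Option Int × Bool)) (k : Int) :
    PySem.Set.contains
      (PySem.Set.ofList ((hs.filter (fun e => e.2.2)).filterMap (fun e => e.2.1))) k
      = (pvGrp hs k).any (fun e => e.2) := by
  rw [Bool.eq_iff_iff]
  rw [PySem.Set.contains_iff, PySem.Set.mem_ofList, List.any_eq_true]
  constructor
  · intro hk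
    obtain ⟨e, he, hh⟩ := List.mem_filterMap.mp hk
    obtain ⟨he1, he2⟩ := List.mem_filter.mp he
    refine ⟨(e.1, e.2.2), ?_, by simpa using he2⟩
    unfold pvGrp
    exact List.mem_filterMap.mpr ⟨e, he1, by rw [if_pos hh]⟩
  · rintro ⟨x, hx, hp⟩
    unfold pvGrp at hx
    obtain ⟨e, he, hxe⟩ := List.mem_filterMap.mp hx
    by_cases hh : e.2.1 = some k
    · rw [if_pos hh] at hxe
      apply List.mem_filterMap.mpr
      refine ⟨e, List.mem_filter.mpr ⟨he, ?_⟩, hh⟩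
      have hx2 : x = (e.1, e.2.2) := (Option.some.inj hxe).symm
      rw [hx2] at hp; simpa using hp
    · rw [if_neg hh] at hxe; cases hxe

-- the two final loops agree: A folds over the pvPick image, B tests the processed-hash set
lemma pvLoop2 (hs : List (Int × Option Int × Bool)) :
    ∀ (L : List (Int × Int)) (i : List Int) (d : PySem.Set Int),
      (∀ kv ∈ L, kv.2 = ((pvGrp hs kv.1).headD (0, false)).1) →
      (L.map (fun kv => (kv.1, pvPick (pvGrp hs kv.1)))).foldl pvAFinStep (i, d)
        = L.foldl (pvReduceGroup
            (PySem.Set.ofList ((hs.filter (fun e => e.2.2)).filterMap (fun e => e.2.1)))) (i, d) := by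
  intro L
  induction L with
  | nil => intro i d _; rfl
  | cons kv rest ih =>
    intro i d hv
    simp only [List.map_cons, List.foldl_cons]
    have hstep : pvAFinStep (i, d) (kv.1, pvPick (pvGrp hs kv.1))
        = pvReduceGroup
            (PySem.Set.ofList ((hs.filter (fun e => e.2.2)).filterMap (fun e => e.2.1)))
            (i, d) kv := by
      unfold pvAFinStep pvReduceGroup
      rw [pvPh_contains, pvPick_snd_eq_any]
      by_cases h : (pvGrp hs kv.1).any (fun e => e.2)
      · simp [h]
      · simp only [h]
        unfold pvPick
        have hf : (pvGrp hs kv.1).find? (fun e => e.2) = none := by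
          have hsm := pvFind?_isSome_eq_any (pvGrp hs kv.1) (fun e => e.2)
          cases hff : (pvGrp hs kv.1).find? (fun e => e.2) with
          | none => rfl
          | some v => exfalso; apply h; rw [← hsm, hff]; rfl
        rw [hf]
        have hv0 := hv kv List.mem_cons_self
        rw [hv0]
    rw [hstep]
    exact ih _ _ (fun x hx => hv x (List.mem_cons_of_mem _ hx))

-- ===== VERDICT (by name: the statement is the Claim_ definition above) =====
theorem src_indexes_process_spec : Claim_equal_src_indexes_process := by
  intro src pa _
  unfold Spec_src_indexes_process src_indexes_process src_indexes_process_alt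
  cases pa with
  | true =>
    rw [pvDecompA_true]
    rfl
  | false =>
    rw [pvDecompA_false]
    dsimp only
    obtain ⟨h1, _, _, h4⟩ := pvCrux (src.filter (fun e => e.2.1.isSome))
    rw [h1, pvLoop2 _ _ _ _ h4]
    rfl
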